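-- pv_equiv track=rewrite | github.com/danielPapovic1/line-mapper-project | src/metrics.py | score_mapping
-- ===== SOURCE A (Python) =====
-- def score_mapping(predicted, truth):
--     """Return (correct, total) counts by comparing predicted mappings to truth."""
--     correct = 0
--     total = 0
--
--     for old_line, true_new in truth.items():
--         total += 1
--         pred_new = predicted.get(old_line)
--         if pred_new == true_new:
--             correct += 1
--
--     return correct, total
-- ===== SOURCE B (Python) =====
-- def score_mapping(predicted, truth):
--     """Return (correct, total) counts by comparing predicted mappings to truth."""
--     p = sorted(predicted.items(), key=lambda kv: kv[0])
--     t = sorted(truth.items(), key=lambda kv: kv[0])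
--     correct = 0
--     i = 0
--     j = 0
--     while i < len(p) and j < len(t):
--         if p[i][0] < t[j][0]:
--             i += 1
--         elif t[j][0] < p[i][0]:
--             j += 1
--         else:
--             if p[i][1] == t[j][1]:
--                 correct += 1
--             i += 1
--             j += 1
--     return correct, len(t)
-- ===== Notes on version B (the rewrite author's own statement) =====
-- stated objective: alternative
-- what changed: Instead of iterating truth and probing predicted with dict.get, B sorts both item lists by key and counts matches with a two-pointer merge scan, with no dictionary lookups at all.
import Mathlib
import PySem

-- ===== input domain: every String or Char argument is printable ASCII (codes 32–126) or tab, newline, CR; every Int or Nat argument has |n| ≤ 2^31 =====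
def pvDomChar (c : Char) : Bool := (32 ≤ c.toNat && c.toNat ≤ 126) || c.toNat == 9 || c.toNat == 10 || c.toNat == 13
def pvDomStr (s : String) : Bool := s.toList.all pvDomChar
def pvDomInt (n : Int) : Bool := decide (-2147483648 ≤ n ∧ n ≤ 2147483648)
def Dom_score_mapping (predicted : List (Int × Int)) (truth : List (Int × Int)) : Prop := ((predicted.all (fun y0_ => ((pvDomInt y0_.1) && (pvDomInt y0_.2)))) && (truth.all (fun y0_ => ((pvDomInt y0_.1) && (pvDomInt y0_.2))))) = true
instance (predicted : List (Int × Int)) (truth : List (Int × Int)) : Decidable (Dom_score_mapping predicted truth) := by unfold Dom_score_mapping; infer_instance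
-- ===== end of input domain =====

-- B replaces A's truth-loop with dict.get probes by sort-both-by-key + a two-pointer merge scan (alternative algorithm, no lookups).

-- ===== PORT A =====
-- for old_line, true_new in truth.items(): total += 1; if predicted.get(old_line) == true_new: correct += 1
def score_mapping (predicted : List (Int × Int)) (truth : List (Int × Int)) : Int × Int :=
  let r := truth.foldl (fun (ct : Int × Int) p =>
    let total := ct.2 + 1
    let pred_new := (PySem.Dict.mk predicted).get? p.1
    if pred_new == some p.2 then (ct.1 + 1, total) else (ct.1, total)) (0, 0)
  r

-- ===== PORT B =====
-- the 'while i < len(p) and j < len(t)' two-pointer scan, as recursion on the two sorted lists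
def pvMergeCount : List (Int × Int) → List (Int × Int) → Int
  | [], _ => 0
  | _ :: _, [] => 0
  | x :: xs, y :: ys =>
    if x.1 < y.1 then pvMergeCount xs (y :: ys)
    else if y.1 < x.1 then pvMergeCount (x :: xs) ys
    else (if x.2 == y.2 then (1 : Int) else 0) + pvMergeCount xs ys

-- p = sorted(predicted.items(), key=fst); t likewise; merge scan; return correct, len(t)
def score_mapping_alt (predicted : List (Int × Int)) (truth : List (Int × Int)) : Int × Int :=
  let p := PySem.List.sorted predicted (fun kv => kv.1) false
  let t := PySem.List.sorted truth (fun kv => kv.1) false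
  (pvMergeCount p t, (t.length : Int))

-- ===== PRECONDITION & SPEC =====
-- Pre_: the association lists represent Python dicts, whose keys are unique; it excludes no
-- input the Python A accepts (a dict never has duplicate keys).
def Pre_score_mapping (predicted : List (Int × Int)) (truth : List (Int × Int)) : Prop :=
  (predicted.map Prod.fst).Nodup ∧ (truth.map Prod.fst).Nodup
instance (predicted : List (Int × Int)) (truth : List (Int × Int)) : Decidable (Pre_score_mapping predicted truth) := by unfold Pre_score_mapping; infer_instance

def pvWitness_score_mapping : (List (Int × Int)) × (List (Int × Int)) := ([(1, 2), (3, 4)], [(1, 2), (3, 5)])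

def Spec_score_mapping (predicted : List (Int × Int)) (truth : List (Int × Int)) (out : Int × Int) : Prop := out = score_mapping_alt predicted truth
instance (predicted : List (Int × Int)) (truth : List (Int × Int)) (out : Int × Int) : Decidable (Spec_score_mapping predicted truth out) := by unfold Spec_score_mapping; infer_instance

-- ===== CLAIM (what is proved, stated in full; the proofs are below) =====
def Claim_equal_score_mapping : Prop := ∀ (predicted : List (Int × Int)) (truth : List (Int × Int)), Dom_score_mapping predicted truth → Pre_score_mapping predicted truth → Spec_score_mapping predicted truth (score_mapping predicted truth)

-- ===== LEMMAS AND PROOFS =====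

-- With unique keys, first-match lookup succeeding with the pair's value is the same as pair membership.
theorem dict_get_eq_mem (predicted : List (Int × Int)) (p : Int × Int)
    (h : (predicted.map Prod.fst).Nodup) :
    ((PySem.Dict.mk predicted).get? p.1 == some p.2) = decide (p ∈ predicted) := by
  induction predicted with
  | nil => simp [PySem.Dict.get?]
  | cons q rest ih =>
    rw [List.map_cons, List.nodup_cons] at h
    obtain ⟨hq, hrest⟩ := h
    rw [PySem.Dict.get?_mk_cons]
    by_cases hk : q.1 = p.1
    · have hpnot : p ∉ rest := fun hmem => hq (by rw [hk]; exact List.mem_map_of_mem hmem)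
      simp only [hk, beq_self_eq_true, if_true, List.mem_cons]
      by_cases hv : q.2 = p.2
      · have : q = p := Prod.ext hk hv
        simp [this]
      · have hne : q ≠ p := fun h' => hv (by rw [h'])
        simp [hpnot, hv, Ne.symm hne]
    · have hne : p ≠ q := fun h' => hk (by rw [h'])
      rw [if_neg (by simpa using hk), ih hrest]
      simp [hne]

-- counting loop = length of the filtered list
theorem foldl_count (cond : Int × Int → Bool) (l : List (Int × Int)) (init : Int) :
    l.foldl (fun (c : Int) p => if cond p then c + 1 else c) init
      = init + ((l.filter cond).length : Int) := by
  induction l generalizing init with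
  | nil => simp
  | cons q rest ih =>
    by_cases h : cond q
    · simp [List.foldl_cons, h, ih]; ring
    · simp [List.foldl_cons, h, ih]

theorem foldl_len (l : List (Int × Int)) (init : Int) :
    l.foldl (fun (t : Int) _ => t + 1) init = init + (l.length : Int) := by
  induction l generalizing init with
  | nil => simp
  | cons q rest ih => simp [List.foldl_cons, ih]; ring

-- on key-strictly-increasing lists, the merge scan counts the truth pairs present in predicted
theorem pvMergeCount_eq (xs ys : List (Int × Int))
    (hx : xs.Pairwise (fun a b => a.1 < b.1)) (hy : ys.Pairwise (fun a b => a.1 < b.1)) :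
    pvMergeCount xs ys = ((ys.filter (fun y => decide (y ∈ xs))).length : Int) := by
  induction xs, ys using pvMergeCount.induct with
  | case1 ys => simp [pvMergeCount]
  | case2 x xs => simp [pvMergeCount]
  | case3 x xs y ys hlt ih =>
    have hx' := (List.pairwise_cons.mp hx).2
    have hyall : ∀ z ∈ y :: ys, x.1 < z.1 := by
      intro z hz
      rcases List.mem_cons.mp hz with h | h
      · rw [h]; exact hlt
      · exact lt_trans hlt ((List.pairwise_cons.mp hy).1 z h)
    rw [pvMergeCount, if_pos hlt, ih hx' hy]
    congr 2
    apply List.filter_congr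
    intro z hz
    have : z ≠ x := fun h => absurd (h ▸ hyall z hz) (lt_irrefl _)
    simp [List.mem_cons, this]
  | case4 x xs y ys hlt hlt2 ih =>
    have hy' := (List.pairwise_cons.mp hy).2
    have hnot : y ∉ x :: xs := by
      intro h
      rcases List.mem_cons.mp h with h | h
      · exact absurd (h ▸ hlt2) (lt_irrefl _)
      · exact absurd (lt_trans hlt2 ((List.pairwise_cons.mp hx).1 y h)) (lt_irrefl _)
    rw [pvMergeCount, if_neg hlt, if_pos hlt2, ih hx hy']
    have h1 : ¬(y = x ∨ y ∈ xs) := by simpa [List.mem_cons] using hnot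
    simp [h1]
  | case5 x xs y ys hlt hlt2 ih =>
    have heq : x.1 = y.1 := le_antisymm (not_lt.mp hlt2) (not_lt.mp hlt)
    have hx' := (List.pairwise_cons.mp hx).2
    have hy' := (List.pairwise_cons.mp hy).2
    have hynotxs : y ∉ xs := fun h =>
      absurd (heq ▸ (List.pairwise_cons.mp hx).1 y h) (lt_irrefl _)
    have hzne : ∀ z ∈ ys, z ≠ x := by
      intro z hz h
      have hzgt : y.1 < z.1 := (List.pairwise_cons.mp hy).1 z hz
      exact absurd (h ▸ (heq ▸ hzgt : x.1 < z.1)) (lt_irrefl _)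
    rw [pvMergeCount, if_neg hlt, if_neg hlt2, ih hx' hy']
    by_cases hv : x.2 = y.2
    · have hxy : y = x := (Prod.ext heq.symm hv.symm)
      simp only [List.filter_cons, hxy, List.mem_cons, true_or, decide_true,
        if_true, List.length_cons, beq_iff_eq, hv]
      have : List.filter (fun z => decide (z = x ∨ z ∈ xs)) ys
          = List.filter (fun z => decide (z ∈ xs)) ys := by
        apply List.filter_congr
        intro z hz
        simp [hzne z hz]
      rw [this]
      push_cast
      ring
    · have hne : y ≠ x := fun h => hv (by rw [h])
      have h1 : ¬(y = x ∨ y ∈ xs) := by simp [hne, hynotxs]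
      simp only [List.filter_cons, List.mem_cons, decide_eq_true_eq, h1,
        if_false, beq_iff_eq, hv]
      have : List.filter (fun z => decide (z = x ∨ z ∈ xs)) ys
          = List.filter (fun z => decide (z ∈ xs)) ys := by
        apply List.filter_congr
        intro z hz
        simp [hzne z hz]
      rw [this]
      simp

-- a key-sorted list of a nodup-key list is key-strictly increasing
theorem sorted_pairwise_lt (l : List (Int × Int)) (h : (l.map Prod.fst).Nodup) :
    (PySem.List.sorted l (fun kv => kv.1) false).Pairwise (fun a b => a.1 < b.1) := by
  have hle : (PySem.List.sorted l (fun kv => kv.1) false).Pairwise (fun a b => a.1 ≤ b.1) :=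
    PySem.List.sorted_pairwise l (fun kv => kv.1)
  have hperm : (PySem.List.sorted l (fun kv => kv.1) false).Perm l := PySem.List.sorted_perm l _ _
  have hnd : ((PySem.List.sorted l (fun kv => kv.1) false).map Prod.fst).Nodup :=
    (List.Perm.nodup_iff (List.Perm.map Prod.fst hperm)).mpr h
  have hne : (PySem.List.sorted l (fun kv => kv.1) false).Pairwise (fun a b => a.1 ≠ b.1) :=
    (List.pairwise_map.mp hnd)
  exact (hle.and hne).imp (fun h => lt_of_le_of_ne h.1 h.2)

theorem score_mapping_eq (predicted truth : List (Int × Int))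
    (hp : (predicted.map Prod.fst).Nodup) (ht : (truth.map Prod.fst).Nodup) :
    score_mapping predicted truth = score_mapping_alt predicted truth := by
  unfold score_mapping score_mapping_alt
  simp only []
  have hbody : (fun (ct : Int × Int) (p : Int × Int) =>
      let total := ct.2 + 1
      let pred_new := (PySem.Dict.mk predicted).get? p.1
      if pred_new == some p.2 then (ct.1 + 1, total) else (ct.1, total))
      = (fun (ct : Int × Int) p =>
        ((fun (c : Int) (p : Int × Int) => if ((PySem.Dict.mk predicted).get? p.1 == some p.2) then c + 1 else c) ct.1 p,
         (fun (t : Int) (_ : Int × Int) => t + 1) ct.2 p)) := by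
    funext ct p
    simp only []
    split_ifs <;> rfl
  rw [hbody, PySem.List.foldl_prod_mk (f := fun (c : Int) (p : Int × Int) => if ((PySem.Dict.mk predicted).get? p.1 == some p.2) then c + 1 else c) (g := fun (t : Int) (_ : Int × Int) => t + 1), foldl_count, foldl_len]
  have hpermp := PySem.List.sorted_perm predicted (fun kv : Int × Int => kv.1) false
  have hpermt := PySem.List.sorted_perm truth (fun kv : Int × Int => kv.1) false
  rw [pvMergeCount_eq _ _ (sorted_pairwise_lt predicted hp) (sorted_pairwise_lt truth ht)]
  -- membership in the sorted predicted = membership in predicted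
  have hmemf : ((PySem.List.sorted truth (fun kv => kv.1) false).filter
        (fun y => decide (y ∈ PySem.List.sorted predicted (fun kv => kv.1) false)))
      = ((PySem.List.sorted truth (fun kv => kv.1) false).filter (fun y => decide (y ∈ predicted))) := by
    apply List.filter_congr
    intro z _
    simp [hpermp.mem_iff]
  have hlenf : ((PySem.List.sorted truth (fun kv => kv.1) false).filter (fun y => decide (y ∈ predicted))).length
      = (truth.filter (fun y => decide (y ∈ predicted))).length :=
    (hpermt.filter _).length_eq
  have hcond : (fun (p : Int × Int) => ((PySem.Dict.mk predicted).get? p.1 == some p.2))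
      = (fun p => decide (p ∈ predicted)) := by
    funext p; exact dict_get_eq_mem predicted p hp
  rw [hmemf, hlenf, hcond, hpermt.length_eq]
  simp

-- ===== VERDICT (by name: the statement is the Claim_ definition above) =====
theorem score_mapping_spec : Claim_equal_score_mapping := by
  intro predicted truth _ hpre
  exact score_mapping_eq predicted truth hpre.1 hpre.2
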